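-- pv_equiv track=rewrite | github.com/ZhouXiaokay/SecureDatabase | data_query/parse_server/parsing.py | is_n_th_enough
-- ===== SOURCE A (Python) =====
-- from typing import Tuple, Set
-- from typing import List
--
-- def is_n_th_enough(res_list: List[List[Tuple[int,object]]]):
--     set_all: List[Set[int]] = []
--
--     data_server_num = len(res_list[0])
--
--     for index in range(data_server_num):
--         set_all.append(set())
--         for res in res_list:
--             if res[index] is not None:
--                 set_all[index].add(res[index][0])
--
--     temp_and = set_all[0]
--     temp_or = set_all[0]
--
--     for set_ in set_all:
--         temp_and = temp_and & set_
--         temp_or = temp_or | set_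
--
--     return temp_and, temp_or
-- ===== SOURCE B (Python) =====
-- def is_n_th_enough(res_list):
--     n = len(res_list[0])
--     cols = [{res[i][0] for res in res_list if res[i] is not None}
--             for i in range(n)]
--     counts = {}
--     for col in cols:
--         for x in col:
--             counts[x] = counts.get(x, 0) + 1
--     inter = {x for x in cols[0] if counts.get(x, 0) == n}
--     union = set(counts)
--     return inter, union
-- ===== Notes on version B (the rewrite author's own statement) =====
-- stated objective: alternative
-- what changed: Replaces A's pairwise set-intersection/union fold over the column sets with a single occurrence counter: intersection = elements of the first column whose count equals the number of columns, union = the counter's keys.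
import Mathlib
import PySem

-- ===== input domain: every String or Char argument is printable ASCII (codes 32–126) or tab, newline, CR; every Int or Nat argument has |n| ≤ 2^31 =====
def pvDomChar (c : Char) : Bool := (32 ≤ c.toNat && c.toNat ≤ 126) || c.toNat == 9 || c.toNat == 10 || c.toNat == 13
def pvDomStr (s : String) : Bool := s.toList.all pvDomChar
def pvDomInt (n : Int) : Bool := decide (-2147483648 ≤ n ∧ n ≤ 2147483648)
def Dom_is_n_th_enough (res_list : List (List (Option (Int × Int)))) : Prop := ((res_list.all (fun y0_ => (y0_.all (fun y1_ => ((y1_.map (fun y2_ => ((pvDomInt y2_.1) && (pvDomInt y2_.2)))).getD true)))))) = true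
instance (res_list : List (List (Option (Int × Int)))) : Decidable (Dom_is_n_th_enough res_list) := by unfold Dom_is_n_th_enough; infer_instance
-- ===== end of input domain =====

-- B replaces A's pairwise &/| fold over the column sets by one occurrence-counter
-- (counts[x] = number of columns containing x): intersection = elements of the first
-- column with full count, union = the counter's keys (objective: alternative).


-- ===== PORT A =====
def is_n_th_enough (res_list : List (List (Option (Int × Int)))) : List Int × List Int :=
  let data_server_num : Int := (res_list.headI.length : Int)   -- len(res_list[0]); Pre_ excludes res_list = []
  -- for index in range(data_server_num): append set(); for res in res_list: add res[index][0] if not None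
  let set_all : List (PySem.Set Int) :=
    (PySem.List.pyRange 0 data_server_num).foldl (fun sa index =>
      sa ++ [res_list.foldl (fun s res =>
        match PySem.List.pyGetD res index none with   -- res[index]; in range under Pre_
        | some p => PySem.Set.add s p.1
        | none => s) PySem.Set.empty]) []
  let first := set_all.headI                           -- set_all[0]; Pre_ excludes set_all = []
  let tmp := set_all.foldl (fun (t : PySem.Set Int × PySem.Set Int) s =>
      (PySem.Set.inter t.1 s, PySem.Set.union t.2 s)) (first, first)
  (tmp.1, tmp.2)

-- ===== PORT B =====
def is_n_th_enough_alt (res_list : List (List (Option (Int × Int)))) : List Int × List Int :=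
  let n : Int := (res_list.headI.length : Int)          -- len(res_list[0]); Pre_ excludes res_list = []
  -- cols = [{res[i][0] for res in res_list if res[i] is not None} for i in range(n)]
  let cols : List (PySem.Set Int) :=
    (PySem.List.pyRange 0 n).map (fun i =>
      PySem.Set.ofList (res_list.filterMap (fun res =>
        (PySem.List.pyGetD res i none).map (fun p => p.1))))
  -- counts[x] = counts.get(x, 0) + 1 over every column
  let counts : PySem.Dict Int Int :=
    cols.foldl (fun d col => col.foldl (fun d x => d.modify x 0 (· + 1)) d) PySem.Dict.empty
  let inter := cols.headI.filter (fun x => decide (counts.getD x 0 = n))   -- cols[0]; Pre_ excludes cols = []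
  let union := counts.keys
  (inter, union)

-- ===== PRECONDITION & SPEC =====
-- Pre_ excludes exactly the inputs where Python A raises IndexError: empty res_list,
-- an empty first row (then set_all[0] is out of range), or a row shorter than the first.
def Pre_is_n_th_enough (res_list : List (List (Option (Int × Int)))) : Prop :=
  res_list ≠ [] ∧ 0 < res_list.headI.length ∧ ∀ row ∈ res_list, res_list.headI.length ≤ row.length
instance (res_list : List (List (Option (Int × Int)))) : Decidable (Pre_is_n_th_enough res_list) := by unfold Pre_is_n_th_enough; infer_instance
def pvWitness_is_n_th_enough : (List (List (Option (Int × Int)))) := ([[some (1, 2)], [some (3, 4)], [none]])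
def Spec_is_n_th_enough (res_list : List (List (Option (Int × Int)))) (out : List Int × List Int) : Prop := out = is_n_th_enough_alt res_list
instance (res_list : List (List (Option (Int × Int)))) (out : List Int × List Int) : Decidable (Spec_is_n_th_enough res_list out) := by unfold Spec_is_n_th_enough; infer_instance

-- ===== CLAIM (what is proved, stated in full; the proofs are below) =====
def Claim_equal_is_n_th_enough : Prop := ∀ (res_list : List (List (Option (Int × Int)))), Dom_is_n_th_enough res_list → Pre_is_n_th_enough res_list → Spec_is_n_th_enough res_list (is_n_th_enough res_list)

-- ===== LEMMAS AND PROOFS =====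

-- A's inner row loop builds exactly B's set of the filtered column entries.
theorem colFold_eq (l : List (List (Option (Int × Int)))) (i : Int) (init : PySem.Set Int) :
    l.foldl (fun s res =>
      match PySem.List.pyGetD res i none with
      | some p => PySem.Set.add s p.1
      | none => s) init
    = (l.filterMap (fun res => (PySem.List.pyGetD res i none).map (fun p => p.1))).foldl
        PySem.Set.add init := by
  induction l generalizing init with
  | nil => rfl
  | cons r t ih =>
      simp only [List.foldl_cons, List.filterMap_cons]
      cases PySem.List.pyGetD r i none with
      | none => exact ih init
      | some p => simp only [Option.map_some, List.foldl_cons]; exact ih _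

-- folding & over a list of sets filters the accumulator by membership in every set
theorem foldl_inter_eq (L : List (PySem.Set Int)) (s : PySem.Set Int) :
    L.foldl PySem.Set.inter s = s.filter (fun x => L.all (fun t => PySem.Set.contains t x)) := by
  induction L generalizing s with
  | nil => simp
  | cons t L ih =>
      simp only [List.foldl_cons, ih, PySem.Set.inter, List.filter_filter, List.all_cons]
      exact List.filter_congr (fun x _ => by rw [Bool.and_comm])

-- folding | over a list of sets is one update with the concatenation
theorem foldl_union_eq (L : List (PySem.Set Int)) (s : PySem.Set Int) :
    L.foldl PySem.Set.union s = PySem.Set.update s L.flatten := by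
  induction L generalizing s with
  | nil => rfl
  | cons t L ih =>
      simp only [List.foldl_cons, List.flatten_cons, PySem.Set.update_append]
      exact ih _

theorem update_self (s : PySem.Set Int) : PySem.Set.update s s = s := by
  rw [PySem.Set.update_eq_append_filter]
  have h : List.filter (fun y => !s.contains y) (PySem.Set.ofList s) = [] := by
    rw [List.filter_eq_nil_iff]
    intro y hy
    have hmem : y ∈ s := by simpa [PySem.Set.mem_ofList] using hy
    simp [hmem]
  rw [h, List.append_nil]

-- an element's count in the flattened nodup columns reaches the number of columns iff it is in all of them
theorem count_flatten_le (L : List (PySem.Set Int)) (x : Int) (h : ∀ c ∈ L, c.Nodup) :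
    L.flatten.count x ≤ L.length := by
  induction L with
  | nil => simp
  | cons c L ih =>
      have hc : c.count x ≤ 1 := List.nodup_iff_count_le_one.mp (h c (by simp)) x
      have := ih (fun d hd => h d (by simp [hd]))
      simp only [List.flatten_cons, List.count_append, List.length_cons]
      omega

theorem count_flatten_eq_iff (L : List (PySem.Set Int)) (x : Int) (h : ∀ c ∈ L, c.Nodup) :
    (L.flatten.count x = L.length ↔ ∀ c ∈ L, x ∈ c) := by
  induction L with
  | nil => simp
  | cons c L ih =>
      have hc : c.count x ≤ 1 := List.nodup_iff_count_le_one.mp (h c (by simp)) x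
      have hle := count_flatten_le L x (fun d hd => h d (by simp [hd]))
      have hih := ih (fun d hd => h d (by simp [hd]))
      simp only [List.flatten_cons, List.count_append, List.length_cons, List.mem_cons]
      constructor
      · intro he
        have h1 : c.count x = 1 := by omega
        have h2 : L.flatten.count x = L.length := by omega
        have hxc : x ∈ c := List.count_pos_iff.mp (by omega)
        intro d hd
        rcases hd with rfl | hd
        · exact hxc
        · exact (hih.mp h2) d hd
      · intro hall
        have hxc : 0 < c.count x := List.count_pos_iff.mpr (hall c (Or.inl rfl))
        have h2 : L.flatten.count x = L.length := hih.mpr (fun d hd => hall d (Or.inr hd))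
        omega

-- the shared core: A's pairwise fold equals B's counter evaluation, on any list of nodup columns
theorem core_eq (cols : List (PySem.Set Int)) (n : Int)
    (hnd : ∀ c ∈ cols, c.Nodup) (hn : (cols.length : Int) = n) :
    ((cols.foldl (fun (t : PySem.Set Int × PySem.Set Int) s =>
        (PySem.Set.inter t.1 s, PySem.Set.union t.2 s)) (cols.headI, cols.headI)).1,
     (cols.foldl (fun (t : PySem.Set Int × PySem.Set Int) s =>
        (PySem.Set.inter t.1 s, PySem.Set.union t.2 s)) (cols.headI, cols.headI)).2)
    = (cols.headI.filter (fun x =>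
        decide ((cols.foldl (fun d col => col.foldl
          (fun (d : PySem.Dict Int Int) x => d.modify x 0 (· + 1)) d) PySem.Dict.empty).getD x 0 = n)),
       (cols.foldl (fun d col => col.foldl
          (fun (d : PySem.Dict Int Int) x => d.modify x 0 (· + 1)) d) PySem.Dict.empty).keys) := by
  have hcounts : (cols.foldl (fun d col => col.foldl
      (fun (d : PySem.Dict Int Int) x => d.modify x 0 (· + 1)) d) PySem.Dict.empty)
      = cols.flatten.foldl (fun (d : PySem.Dict Int Int) x => d.modify x 0 (· + 1)) PySem.Dict.empty := by
    rw [List.foldl_flatten]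
  cases cols with
  | nil => rfl
  | cons c0 rest =>
      have hc0 : c0.Nodup := hnd c0 (by simp)
      rw [PySem.List.foldl_prod_mk]
      simp only [List.headI_cons, Prod.mk.injEq]
      constructor
      · -- intersection component
        rw [List.foldl_cons]
        have h11 : PySem.Set.inter c0 c0 = c0 := by
          simp only [PySem.Set.inter]
          exact List.filter_eq_self.mpr (fun x hx => (PySem.Set.contains_iff c0 x).mpr hx)
        rw [h11, foldl_inter_eq]
        refine List.filter_congr (fun x hx => ?_)
        rw [Bool.eq_iff_iff]
        simp only [List.all_eq_true, PySem.Set.contains_iff, decide_eq_true_eq, hcounts,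
          PySem.Dict.getD_foldl_modify_add_one, PySem.Dict.getD_empty, zero_add]
        have hiff := count_flatten_eq_iff (c0 :: rest) x hnd
        constructor
        · intro hall
          rw [hiff.mpr (fun c hc => by
            rcases List.mem_cons.mp hc with rfl | hc'
            · exact hx
            · exact hall c hc')]
          exact hn
        · intro he
          have hcnt : (c0 :: rest).flatten.count x = (c0 :: rest).length := by
            have : ((c0 :: rest).flatten.count x : Int) = ((c0 :: rest).length : Int) := by
              rw [he, hn]
            exact_mod_cast this
          exact fun c hc => hiff.mp hcnt c (List.mem_cons_of_mem _ hc)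
      · -- union component
        rw [List.foldl_cons]
        have h11 : PySem.Set.union c0 c0 = c0 := update_self c0
        rw [h11, foldl_union_eq, hcounts]
        have hkeys := PySem.Dict.keys_foldl_modify (ν := Int)
          ((c0 :: rest).flatten) 0 (fun _ _ => (· + 1)) PySem.Dict.empty
        rw [hkeys, PySem.Dict.keys_empty, PySem.Set.update_nil_left]
        simp only [List.flatten_cons, PySem.Set.ofList_append]
        rw [PySem.Set.ofList_eq_self_of_nodup c0 hc0]


-- A's set_all and B's cols are the same list of column sets
theorem set_all_eq (res_list : List (List (Option (Int × Int)))) (n : Int) :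
    (PySem.List.pyRange 0 n).foldl (fun sa index =>
      sa ++ [res_list.foldl (fun s res =>
        match PySem.List.pyGetD res index none with
        | some p => PySem.Set.add s p.1
        | none => s) PySem.Set.empty]) []
    = (PySem.List.pyRange 0 n).map (fun i =>
        PySem.Set.ofList (res_list.filterMap (fun res =>
          (PySem.List.pyGetD res i none).map (fun p => p.1)))) := by
  rw [PySem.List.foldl_append_singleton_eq_map (fun index =>
    res_list.foldl (fun s res =>
      match PySem.List.pyGetD res index none with
      | some p => PySem.Set.add s p.1
      | none => s) PySem.Set.empty)]
  rw [List.nil_append]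
  refine List.map_congr_left (fun i _ => ?_)
  rw [colFold_eq, PySem.Set.ofList_eq_foldl]
  rfl

-- ===== VERDICT (by name: the statement is the Claim_ definition above) =====
theorem is_n_th_enough_spec : Claim_equal_is_n_th_enough := by
  intro res_list _ _
  unfold Spec_is_n_th_enough
  simp only [is_n_th_enough, is_n_th_enough_alt]
  rw [set_all_eq]
  refine core_eq _ _ ?_ ?_
  · intro c hc
    rcases List.mem_map.mp hc with ⟨i, _, rfl⟩
    exact PySem.Set.nodup_ofList _
  · rw [List.length_map, PySem.List.pyRange_zero_natCast, List.length_map, List.length_range]
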